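-- pv_equiv track=rewrite | github.com/ArinaArtiukevich/algorithms_practice | basic/firist_project/class/1_5_two_pointers/1_n_pairs_k_diff.py | get_n_pairs_less_iterations
-- ===== SOURCE A (Python) =====
-- from typing import List
--
-- def get_n_pairs_less_iterations(nums: List[int], k: int) -> int:
--     result = 0
--     len_nums = len(nums)
--     l, r = 0, 0
--     while l < len_nums:
--         r = l
--         while r < len_nums:
--             if nums[r] - nums[l] > k:
--                 result += len_nums - r
--                 r = len_nums
--             r += 1
--         l += 1
--     return result
-- ===== SOURCE B (Python) =====
-- def get_n_pairs_less_iterations(nums, k):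
--     total = 0
--     for l, base in enumerate(nums):
--         m = base
--         for x in nums[l:]:
--             if x > m:
--                 m = x
--             if m - base > k:
--                 total += 1
--     return total
-- ===== Notes on version B (the rewrite author's own statement) =====
-- stated objective: alternative
-- what changed: A locates, for each l, the first index r with nums[r]-nums[l]>k and adds the block len-r with an early exit; B instead scans each suffix with a running maximum and counts every j with max(nums[l..j])-nums[l]>k, with no early exit and no index arithmetic.
import Mathlib
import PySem

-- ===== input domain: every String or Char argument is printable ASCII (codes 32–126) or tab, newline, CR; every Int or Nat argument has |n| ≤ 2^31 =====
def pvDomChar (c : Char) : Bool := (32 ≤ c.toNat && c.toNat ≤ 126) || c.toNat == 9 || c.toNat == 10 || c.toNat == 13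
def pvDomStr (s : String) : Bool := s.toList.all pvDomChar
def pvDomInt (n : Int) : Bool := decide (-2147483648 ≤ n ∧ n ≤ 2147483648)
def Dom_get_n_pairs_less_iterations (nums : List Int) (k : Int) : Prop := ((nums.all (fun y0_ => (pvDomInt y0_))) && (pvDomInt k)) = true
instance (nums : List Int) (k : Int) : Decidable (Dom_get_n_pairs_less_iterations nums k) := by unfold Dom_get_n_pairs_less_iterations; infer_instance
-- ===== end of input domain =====

-- B replaces A's find-first-exceeding-index-and-add-a-block inner loop by a running-maximum
-- scan that counts every extension j with max(nums[l..j]) - nums[l] > k (objective: alternative).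

-- ===== PORT A =====
-- inner 'while r < len_nums' loop of A; 'r = len_nums; r += 1' exits the loop after adding
def pvInnerA (nums : List Int) (k : Int) (n l r : Nat) (result : Int) : Int :=
  if r < n then
    (if nums.getD r 0 - nums.getD l 0 > k then result + ((n : Int) - (r : Int))
     else pvInnerA nums k n l (r + 1) result)
  else result
termination_by n - r

-- outer 'while l < len_nums' loop of A
def pvOuterA (nums : List Int) (k : Int) (n l : Nat) (result : Int) : Int :=
  if l < n then pvOuterA nums k n (l + 1) (pvInnerA nums k n l l result) else result
termination_by n - l

def get_n_pairs_less_iterations (nums : List Int) (k : Int) : Int :=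
  pvOuterA nums k nums.length 0 0

-- ===== PORT B =====
-- body of B's inner loop: update the running maximum m, bump total when m - base > k
def pvStep (k base : Int) (st : Int × Int) (x : Int) : Int × Int :=
  let m := if x > st.1 then x else st.1
  (m, if m - base > k then st.2 + 1 else st.2)

def get_n_pairs_less_iterations_alt (nums : List Int) (k : Int) : Int :=
  (PySem.List.enumerate nums 0).foldl
    (fun total p =>
      ((PySem.List.slice nums (some p.1) none).foldl (pvStep k p.2) (p.2, total)).2)
    0

-- ===== PRECONDITION & SPEC =====
def Spec_get_n_pairs_less_iterations (nums : List Int) (k : Int) (out : Int) : Prop := out = get_n_pairs_less_iterations_alt nums k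
instance (nums : List Int) (k : Int) (out : Int) : Decidable (Spec_get_n_pairs_less_iterations nums k out) := by unfold Spec_get_n_pairs_less_iterations; infer_instance

-- ===== CLAIM (what is proved, stated in full; the proofs are below) =====
def Claim_equal_get_n_pairs_less_iterations : Prop := ∀ (nums : List Int) (k : Int), Dom_get_n_pairs_less_iterations nums k → Spec_get_n_pairs_less_iterations nums k (get_n_pairs_less_iterations nums k)

-- ===== LEMMAS AND PROOFS =====

-- A's per-l contribution, phrased on the suffix list: length of the suffix from the
-- first element exceeding base + k onwards (0 if none exceeds).
def pvFirstTail (base k : Int) : List Int → Int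
  | [] => 0
  | x :: rest => if x - base > k then ((x :: rest).length : Int) else pvFirstTail base k rest

theorem pvStep_all (base k m total : Int) (s : List Int) (hm : m - base > k) :
    (s.foldl (pvStep k base) (m, total)).2 = total + s.length := by
  induction s generalizing m total with
  | nil => simp
  | cons x rest ih =>
    have h' : (if x > m then x else m) - base > k := by split_ifs with h <;> omega
    simp only [List.foldl_cons, pvStep, if_pos h']
    rw [ih _ _ h']
    simp; omega

theorem pvStep_eq_firstTail (base k m total : Int) (s : List Int) (hm : ¬ m - base > k) :
    (s.foldl (pvStep k base) (m, total)).2 = total + pvFirstTail base k s := by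
  induction s generalizing m total with
  | nil => simp [pvFirstTail]
  | cons x rest ih =>
    by_cases h : x - base > k
    · have h' : (if x > m then x else m) - base > k := by split_ifs with hx <;> omega
      simp only [List.foldl_cons, pvStep, if_pos h']
      rw [pvStep_all _ _ _ _ _ h']
      simp [pvFirstTail, if_pos h]; omega
    · have h' : ¬ (if x > m then x else m) - base > k := by split_ifs with hx <;> omega
      simp only [List.foldl_cons, pvStep, if_neg h']
      rw [ih _ _ h']
      simp [pvFirstTail, if_neg h]

theorem pvInnerA_eq (nums : List Int) (k : Int) (l r : Nat) (result : Int)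
    (hr : r ≤ nums.length) :
    pvInnerA nums k nums.length l r result
      = result + pvFirstTail (nums.getD l 0) k (nums.drop r) := by
  induction hn : nums.length - r generalizing r result with
  | zero =>
    have : ¬ r < nums.length := by omega
    rw [pvInnerA, if_neg this, List.drop_of_length_le (by omega)]
    simp [pvFirstTail]
  | succ fuel ih =>
    have hlt : r < nums.length := by omega
    have hd : nums.drop r = nums[r] :: nums.drop (r + 1) :=
      List.drop_eq_getElem_cons hlt
    have hget : nums.getD r 0 = nums[r] := List.getD_eq_getElem nums 0 hlt
    rw [pvInnerA, if_pos hlt, hd]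
    by_cases h : nums[r] - nums.getD l 0 > k
    · rw [if_pos (hget ▸ h), pvFirstTail, if_pos h]
      have hlen : (nums[r] :: nums.drop (r + 1)).length = nums.length - r := by
        rw [List.length_cons, List.length_drop]; omega
      rw [hlen]; omega
    · rw [if_neg (hget ▸ h), pvFirstTail, if_neg h]
      exact ih (r + 1) result (by omega) (by omega)

theorem pvInner_agree (nums : List Int) (k : Int) (l : Nat) (result : Int)
    (hl : l < nums.length) :
    pvInnerA nums k nums.length l l result
      = ((nums.drop l).foldl (pvStep k (nums.getD l 0)) (nums.getD l 0, result)).2 := by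
  have hd : nums.drop l = nums[l] :: nums.drop (l + 1) := List.drop_eq_getElem_cons hl
  have hget : nums.getD l 0 = nums[l] := List.getD_eq_getElem nums 0 hl
  rw [pvInnerA_eq nums k l l result (by omega)]
  by_cases hk : (0 : Int) > k
  · rw [pvStep_all _ _ _ _ _ (by omega)]
    rw [hd, pvFirstTail, if_pos (by omega)]
  · rw [pvStep_eq_firstTail _ _ _ _ _ (by omega)]

theorem pvOuterA_eq (nums : List Int) (k : Int) (l : Nat) (result : Int)
    (hl : l ≤ nums.length) :
    pvOuterA nums k nums.length l result
      = (PySem.List.enumerate (nums.drop l) l).foldl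
          (fun total p =>
            ((PySem.List.slice nums (some p.1) none).foldl (pvStep k p.2) (p.2, total)).2)
          result := by
  induction hn : nums.length - l generalizing l result with
  | zero =>
    have : ¬ l < nums.length := by omega
    rw [pvOuterA, if_neg this, List.drop_of_length_le (by omega)]
    simp [PySem.List.enumerate]
  | succ fuel ih =>
    have hlt : l < nums.length := by omega
    have hd : nums.drop l = nums[l] :: nums.drop (l + 1) := List.drop_eq_getElem_cons hlt
    rw [pvOuterA, if_pos hlt, hd, PySem.List.enumerate_cons, List.foldl_cons]
    have hslice : PySem.List.slice nums (some ((l : Int))) none = nums.drop l :=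
      PySem.List.slice_from_natCast nums l
    simp only [hslice, hd]
    rw [ih (l + 1) _ (by omega) (by omega)]
    have hcast : ((l : Int) + 1) = ((l + 1 : Nat) : Int) := by push_cast; ring
    rw [hcast]
    congr 1
    rw [pvInner_agree nums k l result hlt, hd,
      List.getD_eq_getElem nums 0 hlt]

-- ===== VERDICT (by name: the statement is the Claim_ definition above) =====
theorem get_n_pairs_less_iterations_spec : Claim_equal_get_n_pairs_less_iterations := by
  intro nums k _
  unfold Spec_get_n_pairs_less_iterations get_n_pairs_less_iterations
    get_n_pairs_less_iterations_alt
  rw [pvOuterA_eq nums k 0 0 (by omega)]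
  simp
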